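-- pv_equiv track=rewrite | github.com/HerbeMalveillante/ecole | tp5/ex3.py | rassemble
-- ===== SOURCE A (Python) =====
-- def eclatement(lis):
--     lis1 = []
--     lis2 = []
--
--     for i in range(len(lis)):
--         if i % 2 == 0:
--             lis1.append(lis[i])
--         else:
--             lis2.append(lis[i])
--
--     return lis1, lis2
--
-- def rassemble(lis):
--     if len(lis) % 2 != 0:
--         return []
--
--     total = []
--     l1, l2 = eclatement(lis)
--     for i in range(len(l1)):
--         total.append(f"{l1[i]} {l2[i]}")
--     return total
-- ===== SOURCE B (Python) =====
-- def rassemble(lis):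
--     if len(lis) % 2 != 0:
--         return []
--     it = iter(lis)
--     return [f"{a} {b}" for a, b in zip(it, it)]
-- ===== Notes on version B (the rewrite author's own statement) =====
-- stated objective: idiomatic
-- what changed: Replaces the parity-partition helper (eclatement) plus an index-parallel formatting loop with a single pairwise pass that consumes the list two elements at a time via zip over one iterator.
import Mathlib
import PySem

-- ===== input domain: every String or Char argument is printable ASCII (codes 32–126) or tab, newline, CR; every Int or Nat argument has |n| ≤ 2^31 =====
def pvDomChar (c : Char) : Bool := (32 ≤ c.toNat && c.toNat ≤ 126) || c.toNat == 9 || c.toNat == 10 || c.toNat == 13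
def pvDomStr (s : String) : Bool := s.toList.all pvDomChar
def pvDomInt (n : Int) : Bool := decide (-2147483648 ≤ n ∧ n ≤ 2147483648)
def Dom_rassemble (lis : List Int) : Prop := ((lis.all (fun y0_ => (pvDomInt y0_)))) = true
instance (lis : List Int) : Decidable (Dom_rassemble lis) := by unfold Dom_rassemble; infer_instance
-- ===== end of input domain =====

-- B replaces the parity-partition helper and the index-parallel formatting loop with a
-- single pairwise pass over consecutive pairs (objective: idiomatic; same cost).

-- ===== PORT A =====
-- eclatement: for i in range(len(lis)): append lis[i] to lis1 (i even) or lis2 (i odd)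
def eclatement (lis : List Int) : List Int × List Int :=
  (PySem.List.pyRange 0 (lis.length : Int) 1).foldl
    (fun (p : List Int × List Int) i =>
      if PySem.Int.mod i 2 = 0 then (p.1 ++ [PySem.List.pyGetD lis i 0], p.2)
      else (p.1, p.2 ++ [PySem.List.pyGetD lis i 0]))
    ([], [])

def rassemble (lis : List Int) : List String :=
  if lis.length % 2 ≠ 0 then []
  else
    let p := eclatement lis
    (PySem.List.pyRange 0 (p.1.length : Int) 1).foldl
      (fun total i =>
        total ++ [PySem.Int.toStr (PySem.List.pyGetD p.1 i 0) ++ " " ++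
                  PySem.Int.toStr (PySem.List.pyGetD p.2 i 0)])
      []

-- ===== PORT B =====
-- zip(it, it) over one iterator yields consecutive pairs; ported as the equivalent
-- two-at-a-time structural recursion (a trailing unpaired element is dropped, as zip does)
def pairsB : List Int → List String
  | [] => []
  | [_] => []
  | a :: b :: rest => (PySem.Int.toStr a ++ " " ++ PySem.Int.toStr b) :: pairsB rest

def rassemble_alt (lis : List Int) : List String :=
  if lis.length % 2 ≠ 0 then [] else pairsB lis

-- ===== PRECONDITION & SPEC =====
def Spec_rassemble (lis : List Int) (out : List String) : Prop := out = rassemble_alt lis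
instance (lis : List Int) (out : List String) : Decidable (Spec_rassemble lis out) := by unfold Spec_rassemble; infer_instance

-- ===== CLAIM (what is proved, stated in full; the proofs are below) =====
def Claim_equal_rassemble : Prop := ∀ (lis : List Int), Dom_rassemble lis → Spec_rassemble lis (rassemble lis)

-- ===== LEMMAS AND PROOFS =====

-- even-indexed / odd-indexed elements, structurally
def evensL : List Int → List Int
  | [] => []
  | [a] => [a]
  | a :: _ :: t => a :: evensL t

def oddsL : List Int → List Int
  | [] => []
  | [_] => []
  | _ :: b :: t => b :: oddsL t

theorem evensL_append_singleton (xs : List Int) (x : Int) :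
    evensL (xs ++ [x]) = if xs.length % 2 = 0 then evensL xs ++ [x] else evensL xs := by
  induction xs using evensL.induct with
  | case1 => simp [evensL]
  | case2 a => simp [evensL]
  | case3 a b t ih =>
      simp only [List.cons_append, evensL, List.length_cons, ih]
      have : (t.length + 1 + 1) % 2 = t.length % 2 := by omega
      rw [this]; split <;> simp

theorem oddsL_append_singleton (xs : List Int) (x : Int) :
    oddsL (xs ++ [x]) = if xs.length % 2 = 0 then oddsL xs else oddsL xs ++ [x] := by
  induction xs using oddsL.induct with
  | case1 => simp [oddsL]
  | case2 a => simp [oddsL]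
  | case3 a b t ih =>
      simp only [List.cons_append, oddsL, List.length_cons, ih]
      have : (t.length + 1 + 1) % 2 = t.length % 2 := by omega
      rw [this]; split <;> simp

theorem length_evensL_oddsL (lis : List Int) (h : lis.length % 2 = 0) :
    (evensL lis).length = (oddsL lis).length := by
  induction lis using evensL.induct with
  | case1 => simp [evensL, oddsL]
  | case2 a => simp at h
  | case3 a b t ih =>
      simp only [evensL, oddsL, List.length_cons]
      rw [ih (by simp at h; omega)]

theorem eclatement_eq (lis : List Int) : eclatement lis = (evensL lis, oddsL lis) := by
  unfold eclatement
  rw [PySem.List.pyRange_one]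
  simp only [List.foldl_map, Int.sub_zero, Int.toNat_natCast]
  have key : ∀ n, n ≤ lis.length →
      (List.range n).foldl
        (fun (p : List Int × List Int) (k : Nat) =>
          if PySem.Int.mod ((0:Int) + k) 2 = 0 then (p.1 ++ [PySem.List.pyGetD lis ((0:Int) + k) 0], p.2)
          else (p.1, p.2 ++ [PySem.List.pyGetD lis ((0:Int) + k) 0]))
        ([], [])
      = (evensL (lis.take n), oddsL (lis.take n)) := by
    intro n hn
    induction n with
    | zero => simp [evensL, oddsL]
    | succ m ih =>
        rw [List.range_succ, List.foldl_append, ih (by omega)]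
        have hm : m < lis.length := by omega
        have htake : lis.take (m + 1) = lis.take m ++ [lis[m]] := by
          rw [List.take_add_one]; simp [List.getElem?_eq_getElem hm]
        have hget : PySem.List.pyGetD lis ((0:Int) + (m:Int)) 0 = lis[m] := by
          simp [PySem.List.pyGetD_natCast, List.getD_eq_getElem?_getD,
                List.getElem?_eq_getElem hm]
        have hmod : PySem.Int.mod ((0:Int) + (m:Int)) 2 = ((m % 2 : Nat) : Int) := by
          simpa using PySem.Int.mod_natCast m 2
        have hlen : (lis.take m).length = m := by simp [List.length_take]; omega
        simp only [List.foldl_cons, List.foldl_nil, hget, hmod, htake,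
                   evensL_append_singleton, oddsL_append_singleton, hlen]
        by_cases hp : m % 2 = 0
        · simp [hp]
        · simp [hp]; omega
  have := key lis.length le_rfl
  simp only [List.take_length] at this
  exact this

theorem map_range_getD_zipWith (F : Int → Int → String) :
    ∀ (l1 l2 : List Int), l1.length = l2.length →
      (List.range l1.length).map (fun k => F (l1.getD k 0) (l2.getD k 0)) = List.zipWith F l1 l2 := by
  intro l1
  induction l1 with
  | nil => intro l2 h; simp
  | cons a t ih =>
      intro l2 h
      cases l2 with
      | nil => simp at h
      | cons b s =>
          simp only [List.length_cons, List.range_succ_eq_map, List.map_cons, List.map_map,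
                     List.zipWith_cons_cons]
          rw [← ih s (by simpa using h)]
          simp [Function.comp]

theorem pairsB_eq_zipWith (lis : List Int) :
    pairsB lis = List.zipWith (fun a b => PySem.Int.toStr a ++ " " ++ PySem.Int.toStr b)
      (evensL lis) (oddsL lis) := by
  induction lis using pairsB.induct with
  | case1 => simp [pairsB, evensL, oddsL]
  | case2 a => simp [pairsB, evensL, oddsL]
  | case3 a b t ih => simp [pairsB, evensL, oddsL, ih]

-- ===== VERDICT (by name: the statement is the Claim_ definition above) =====
theorem rassemble_spec : Claim_equal_rassemble := by
  intro lis _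
  unfold Spec_rassemble rassemble rassemble_alt
  by_cases h : lis.length % 2 ≠ 0
  · simp [h]
  · simp only [h, if_false]
    simp only [ne_eq, not_not] at h
    rw [eclatement_eq]
    rw [PySem.List.foldl_append_singleton_eq_map, PySem.List.pyRange_one]
    simp only [List.map_map, Int.sub_zero, Int.toNat_natCast]
    have hget : ∀ (l : List Int) (k : Nat),
        PySem.List.pyGetD l ((0:Int) + (k:Int)) 0 = l.getD k 0 := by
      intro l k; simp [PySem.List.pyGetD_natCast]
    calc (List.range (evensL lis).length).map
            (fun k => PySem.Int.toStr (PySem.List.pyGetD (evensL lis) ((0:Int) + (k:Nat)) 0) ++ " " ++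
                      PySem.Int.toStr (PySem.List.pyGetD (oddsL lis) ((0:Int) + (k:Nat)) 0))
        = (List.range (evensL lis).length).map
            (fun k => PySem.Int.toStr ((evensL lis).getD k 0) ++ " " ++
                      PySem.Int.toStr ((oddsL lis).getD k 0)) := by
            apply List.map_congr_left; intro k _; rw [hget, hget]
      _ = List.zipWith (fun a b => PySem.Int.toStr a ++ " " ++ PySem.Int.toStr b)
            (evensL lis) (oddsL lis) :=
            map_range_getD_zipWith (fun a b => PySem.Int.toStr a ++ " " ++ PySem.Int.toStr b) (evensL lis) (oddsL lis) (length_evensL_oddsL lis h)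
      _ = pairsB lis := (pairsB_eq_zipWith lis).symm
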